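-- pv_equiv track=rewrite | github.com/Yonisegall/Homework | HW_2/question2.py | string_changer
-- ===== SOURCE A (Python) =====
-- def my_is_upper(text):
--     """
--     Arg:
--        text from string type.
--     return:
--         True or False if all the letters in
--         the string is capital letters
--     """
--     for i in text:
--         if 123 > ord(i) > 96:
--             return False
--     return True
--
-- def my_is_lower(text):
--     """
--     Arg:
--        text from string type.
--     return:
--         True or False if all the letters in
--         the string is small letters
--     """
--     for i in text:
--         if 91 > ord(i) > 64:
--             return False
--     return True
--
-- def my_upper(text):
--     """
--     Arg:
--         text from string type.
--     return:
--         text that all the small letters in the string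
--         change to capital letters.
--     """
--     new_text = ""
--     new_ord = 0
--     for i in range(len(text)):
--         if not my_is_upper(text[i]):
--             new_ord = ord(text[i]) - 32
--             new_text = new_text + chr(new_ord)
--         else:
--             new_text = new_text + text[i]
--     return new_text
--
-- def my_lower(text):
--     """
--    Arg:
--        text from string type.
--    return:
--        text that all the capital letters in the string
--        change to small letters.
--    """
--     new_text = ""
--     new_ord = 0
--     for i in range(len(text)):
--         if not my_is_lower(text[i]):
--             new_ord = ord(text[i]) + 32
--             new_text = new_text + chr(new_ord)
--         else:
--             new_text = new_text + text[i]
--     return new_text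
--
-- def string_changer(text):
--     """
--    Arg:
--        text from string type.
--    return:
--        text that all the small letters and the capital
--        letters, is replaced.
--        if there is "$" note in the string,
--        after "$" even times  - change
--        after "$" odd times - not change
--    """
--     new_text = ""
--     bool_1 = True
--     for i in text:
--         if i == "$":
--             bool_1 = not bool_1
--             continue
--         if bool_1 == True:
--             if my_is_upper(i) == True:
--                 new_text = new_text + my_lower(i)
--             else:
--                 new_text = new_text + my_upper(i)
--         else:
--             new_text += i
--     return new_text
-- ===== SOURCE B (Python) =====
-- def string_changer(text):
--     def swap(c):
--         o = ord(c)
--         if 65 <= o <= 90: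
--             return chr(o + 32)
--         if 97 <= o <= 122:
--             return chr(o - 32)
--         return c
--     parts = []
--     for i, seg in enumerate(text.split('$')):
--         if i % 2 == 0:
--             parts.append(''.join(map(swap, seg)))
--         else:
--             parts.append(seg)
--     return ''.join(parts)
-- ===== Notes on version B (the rewrite author's own statement) =====
-- stated objective: faster
-- what changed: Replaces the char-by-char loop with a parity flag and per-character helper calls (each rebuilding strings by concatenation) by splitting the text on the dollar delimiter once and swapcasing the even-indexed segments with a constant-time ASCII character map, joining the pieces at the end.
import Mathlib
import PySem

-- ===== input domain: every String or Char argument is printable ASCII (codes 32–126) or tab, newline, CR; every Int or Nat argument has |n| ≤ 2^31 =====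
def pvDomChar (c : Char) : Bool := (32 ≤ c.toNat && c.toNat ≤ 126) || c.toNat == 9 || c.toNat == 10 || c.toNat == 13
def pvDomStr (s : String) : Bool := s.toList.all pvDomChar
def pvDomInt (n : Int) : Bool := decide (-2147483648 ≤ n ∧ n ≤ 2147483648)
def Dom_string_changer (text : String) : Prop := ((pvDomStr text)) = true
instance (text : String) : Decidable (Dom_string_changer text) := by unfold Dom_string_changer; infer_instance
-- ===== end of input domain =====

-- B splits the text on '$' once and ASCII-swapcases the even-indexed segments, instead of
-- A's char-by-char loop with a parity flag and string-rebuilding helper functions (faster by the measured timing run, same O(n)).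


-- ===== PORT A =====
def my_is_upper (text : List Char) : Bool :=
  match text with
  | [] => true
  | c :: rest => if 96 < c.toNat ∧ c.toNat < 123 then false else my_is_upper rest

def my_is_lower (text : List Char) : Bool :=
  match text with
  | [] => true
  | c :: rest => if 64 < c.toNat ∧ c.toNat < 91 then false else my_is_lower rest

def my_upper (text : List Char) : List Char :=
  text.foldl (fun new_text c =>
    if ¬ (my_is_upper [c] = true) then new_text ++ [Char.ofNat (c.toNat - 32)]
    else new_text ++ [c]) []

def my_lower (text : List Char) : List Char :=
  text.foldl (fun new_text c =>
    if ¬ (my_is_lower [c] = true) then new_text ++ [Char.ofNat (c.toNat + 32)]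
    else new_text ++ [c]) []

-- the body of A's loop over the characters of `text`; state = (new_text, bool_1)
def pvStepA (st : List Char × Bool) (c : Char) : List Char × Bool :=
  if c = '$' then (st.1, !st.2)
  else if st.2 = true then
    if my_is_upper [c] = true then (st.1 ++ my_lower [c], st.2)
    else (st.1 ++ my_upper [c], st.2)
  else (st.1 ++ [c], st.2)

def string_changer (text : String) : String :=
  String.mk (text.toList.foldl pvStepA ([], true)).1

-- ===== PORT B =====
def pvSwapChar (c : Char) : Char :=
  if 65 ≤ c.toNat ∧ c.toNat ≤ 90 then Char.ofNat (c.toNat + 32)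
  else if 97 ≤ c.toNat ∧ c.toNat ≤ 122 then Char.ofNat (c.toNat - 32)
  else c

def string_changer_alt (text : String) : String :=
  String.mk
    (((PySem.List.enumerate (PySem.Chars.splitOn text.toList ['$'])).map
      (fun p => if p.1 % 2 = 0 then p.2.map pvSwapChar else p.2)).flatten)

-- ===== PRECONDITION & SPEC =====
def Spec_string_changer (text : String) (out : String) : Prop := out = string_changer_alt text
instance (text : String) (out : String) : Decidable (Spec_string_changer text out) := by unfold Spec_string_changer; infer_instance

-- ===== CLAIM (what is proved, stated in full; the proofs are below) =====
def Claim_equal_string_changer : Prop := ∀ (text : String), Dom_string_changer text → Spec_string_changer text (string_changer text)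

-- ===== LEMMAS AND PROOFS =====

-- a direct structural recursion computing text.split('$')
def splitD : List Char → List (List Char)
  | [] => [[]]
  | c :: cs =>
    if c = '$' then [] :: splitD cs
    else
      match splitD cs with
      | [] => [[c]]
      | s :: rest => (c :: s) :: rest

theorem splitD_ne_nil (cs : List Char) : splitD cs ≠ [] := by
  cases cs with
  | nil => simp [splitD]
  | cons c cs =>
    simp only [splitD]
    split
    · simp
    · cases h : splitD cs <;> simp

theorem go_eq (fuel : Nat) : ∀ (l cur : List Char) (acc : List (List Char)),
    l.length ≤ fuel →
    PySem.Chars.splitOn.go ['$'] fuel l cur acc =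
      acc.reverse ++ ((cur.reverse ++ (splitD l).headI) :: (splitD l).tail) := by
  induction fuel with
  | zero =>
    intro l cur acc hl
    have : l = [] := List.length_eq_zero_iff.mp (Nat.le_zero.mp hl)
    subst this
    simp [PySem.Chars.splitOn.go, splitD]
  | succ fuel ih =>
    intro l cur acc hl
    cases l with
    | nil => simp [PySem.Chars.splitOn.go, splitD]
    | cons c rest =>
      simp only [PySem.Chars.splitOn.go]
      by_cases hc : c = '$'
      · subst hc
        have hpre : List.isPrefixOf ['$'] ('$' :: rest) = true := by
          simp [List.isPrefixOf]
        rw [if_pos hpre]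
        rw [show List.drop (['$'].length) ('$' :: rest) = rest from rfl]
        rw [ih rest [] (cur.reverse :: acc) (by simpa using Nat.le_of_succ_le_succ hl)]
        cases hsr : splitD rest with
        | nil => exact absurd hsr (splitD_ne_nil rest)
        | cons a b => simp [splitD, hsr]
      · have hpre : List.isPrefixOf ['$'] (c :: rest) = false := by
          simp [List.isPrefixOf]
          exact fun h => absurd h.symm hc
        rw [if_neg (by simp [hpre])]
        have := ih rest (c :: cur) acc (Nat.le_of_succ_le_succ (by simpa using hl))
        rw [this]
        simp only [splitD, if_neg hc]
        cases h : splitD rest with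
        | nil => exact absurd h (splitD_ne_nil rest)
        | cons s rs => simp

theorem splitOn_eq_splitD (cs : List Char) :
    PySem.Chars.splitOn cs ['$'] = splitD cs := by
  unfold PySem.Chars.splitOn
  rw [go_eq (cs.length + 1) cs [] [] (Nat.le_succ _)]
  cases h : splitD cs with
  | nil => exact absurd h (splitD_ne_nil cs)
  | cons s rs => simp

-- the common segment-processing scheme: swapcase the segments while b is true, flip b each time
def procSegs : Bool → List (List Char) → List Char
  | _, [] => []
  | b, s :: rest => (if b then s.map pvSwapChar else s) ++ procSegs (!b) rest

theorem per_char (c : Char) :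
    (if my_is_upper [c] = true then my_lower [c] else my_upper [c]) = [pvSwapChar c] := by
  by_cases h1 : 96 < c.toNat ∧ c.toNat < 123
  · have hA : ¬ (65 ≤ c.toNat ∧ c.toNat ≤ 90) := by omega
    have hB : 97 ≤ c.toNat ∧ c.toNat ≤ 122 := by omega
    simp [my_is_upper, my_upper, pvSwapChar, h1, hA, hB]
  · by_cases h2 : 64 < c.toNat ∧ c.toNat < 91
    · have hA : 65 ≤ c.toNat ∧ c.toNat ≤ 90 := by omega
      simp [my_is_upper, my_is_lower, my_lower, pvSwapChar, h1, h2, hA]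
    · have hA : ¬ (65 ≤ c.toNat ∧ c.toNat ≤ 90) := by omega
      have hB : ¬ (97 ≤ c.toNat ∧ c.toNat ≤ 122) := by omega
      simp [my_is_upper, my_is_lower, my_lower, pvSwapChar, h1, h2, hA, hB]

theorem stepA_dollar (st : List Char × Bool) : pvStepA st '$' = (st.1, !st.2) := by
  simp [pvStepA]

theorem stepA_true (c : Char) (acc : List Char) (hc : c ≠ '$') :
    pvStepA (acc, true) c
      = (acc ++ (if my_is_upper [c] = true then my_lower [c] else my_upper [c]), true) := by
  simp only [pvStepA, if_neg hc]
  split_ifs <;> simp_all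

theorem stepA_false (c : Char) (acc : List Char) (hc : c ≠ '$') :
    pvStepA (acc, false) c = (acc ++ [c], false) := by
  simp [pvStepA, hc]

theorem foldA_eq (cs : List Char) : ∀ (b : Bool) (acc : List Char),
    (cs.foldl pvStepA (acc, b)).1 = acc ++ procSegs b (splitD cs) := by
  induction cs with
  | nil => intro b acc; simp [splitD, procSegs]
  | cons c cs ih =>
    intro b acc
    by_cases hc : c = '$'
    · subst hc
      rw [List.foldl_cons, stepA_dollar, ih (!b) acc]
      simp [splitD, procSegs]
    · cases h : splitD cs with
      | nil => exact absurd h (splitD_ne_nil cs)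
      | cons s rs =>
        have hsp : splitD (c :: cs) = (c :: s) :: rs := by
          simp [splitD, if_neg hc, h]
        cases b with
        | true =>
          rw [List.foldl_cons, stepA_true c acc hc, per_char, ih true, hsp, h]
          simp [procSegs]
        | false =>
          rw [List.foldl_cons, stepA_false c acc hc, ih false, hsp, h]
          simp [procSegs]

theorem enum_eq (segs : List (List Char)) : ∀ (k : Int), 0 ≤ k →
    ((PySem.List.enumerate segs k).map
      (fun p => if p.1 % 2 = 0 then p.2.map pvSwapChar else p.2)).flatten
    = procSegs (decide (k % 2 = 0)) segs := by
  induction segs with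
  | nil => intro k hk; simp [PySem.List.enumerate, procSegs]
  | cons s rest ih =>
    intro k hk
    simp only [PySem.List.enumerate, List.map_cons, List.flatten_cons]
    rw [ih (k + 1) (by omega)]
    have hpar : decide ((k + 1) % 2 = 0) = ! decide (k % 2 = 0) := by
      by_cases h : k % 2 = 0
      · simp [h]; omega
      · simp [h]; omega
    rw [hpar]
    simp only [procSegs]
    by_cases h : k % 2 = 0 <;> simp [h]

-- ===== VERDICT (by name: the statement is the Claim_ definition above) =====
theorem string_changer_spec : Claim_equal_string_changer := by
  intro text _
  unfold Spec_string_changer string_changer string_changer_alt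
  rw [splitOn_eq_splitD, enum_eq _ 0 (by norm_num), foldA_eq]
  simp
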